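-- pv_equiv track=rewrite | github.com/Opanther/Python_workbook | Lists/unary_and_binary_operators.py | identifyUnary
-- ===== SOURCE A (Python) =====
-- def identifyUnary(tokens):
--     retval = []
--     # process each tooken in the list
--     for i in range(len(tokens)):
--         # if the first token in the list is + or - then it is a unary operator
--         if i == 0 and (tokens[i] == "+" or tokens[i] == "-"):
--             retval.append("u" + tokens[i])
--         # if the tokem is a + or - and the previous token is an operator or an open parenthesis then it is a unary operator
--         elif i > 0 and ( tokens[i] == "+" or tokens[i] == "-") and (tokens[i-1] == "+" or tokens[i-1] == "-" or tokens[i-1] == "*" or tokens[i-1] == "/" or tokens[i-1] =="("):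
--             retval.append("u" + tokens[i])
--         else:
--             retval.append(tokens[i])
--
--     return retval
-- ===== SOURCE B (Python) =====
-- def identifyUnary(tokens):
--     # Run-based scanner: whenever a '+'/'-' token is seen, consume the whole
--     # maximal run of '+'/'-' tokens at once; every run element after the first
--     # is automatically unary (its predecessor is '+'/'-'), and the first is
--     # unary iff the run is at the start or follows '*', '/' or '('.
--     out = []
--     n = len(tokens)
--     i = 0
--     trigger = True  # start of the expression triggers unary marking
--     while i < n:
--         t = tokens[i]
--         if t in ("+", "-"):
--             j = i + 1
--             while j < n and tokens[j] in ("+", "-"):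
--                 j += 1
--             out.append(("u" + t) if trigger else t)
--             out.extend("u" + tokens[k] for k in range(i + 1, j))
--             i = j
--             trigger = False
--         else:
--             out.append(t)
--             i += 1
--             trigger = t in ("*", "/", "(")
--     return out
-- ===== Notes on version B (the rewrite author's own statement) =====
-- stated objective: alternative
-- what changed: Replaces A's per-index loop that re-inspects tokens[i-1] at every step by a run-based scanner with a trigger flag: an inner scan consumes each maximal run of '+'/'-' tokens at once, marking all run elements after the first unconditionally and the first one from the flag, so the predecessor lookup disappears.
import Mathlib
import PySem

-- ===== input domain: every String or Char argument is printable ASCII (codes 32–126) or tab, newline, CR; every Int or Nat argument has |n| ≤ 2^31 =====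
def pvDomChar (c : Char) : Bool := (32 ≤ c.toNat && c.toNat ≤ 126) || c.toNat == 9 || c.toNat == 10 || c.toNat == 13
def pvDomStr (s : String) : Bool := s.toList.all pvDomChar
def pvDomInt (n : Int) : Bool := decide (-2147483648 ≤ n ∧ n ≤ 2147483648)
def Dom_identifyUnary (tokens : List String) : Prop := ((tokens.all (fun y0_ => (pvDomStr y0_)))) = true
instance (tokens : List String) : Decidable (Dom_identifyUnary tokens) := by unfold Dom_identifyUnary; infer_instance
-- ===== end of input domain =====

-- B replaces A's per-index loop (with its tokens[i-1] lookup at every step) by a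
-- run-based scanner that consumes each maximal '+'/'-' run at once, steered by a
-- trigger flag; objective: alternative (same cost, different traversal).


-- ===== PORT A =====
def identifyUnary (tokens : List String) : List String :=
  (PySem.List.pyRange 0 (tokens.length : Int)).foldl
    (fun retval i =>
      if i == 0 && (PySem.List.pyGetD tokens i "" == "+" || PySem.List.pyGetD tokens i "" == "-") then
        retval ++ ["u" ++ PySem.List.pyGetD tokens i ""]
      else if decide (i > 0) &&
              (PySem.List.pyGetD tokens i "" == "+" || PySem.List.pyGetD tokens i "" == "-") &&
              (PySem.List.pyGetD tokens (i - 1) "" == "+" || PySem.List.pyGetD tokens (i - 1) "" == "-" ||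
               PySem.List.pyGetD tokens (i - 1) "" == "*" || PySem.List.pyGetD tokens (i - 1) "" == "/" ||
               PySem.List.pyGetD tokens (i - 1) "" == "(") then
        retval ++ ["u" ++ PySem.List.pyGetD tokens i ""]
      else
        retval ++ [PySem.List.pyGetD tokens i ""])
    []

-- ===== PORT B =====
/-- `t in ("+", "-")` -/
def pvIsPM (t : String) : Bool := t == "+" || t == "-"

/-- The inner `while` of Source B: split off the maximal leading run of `+`/`-` tokens. -/
def pvTakeRun : List String → List String × List String
  | [] => ([], [])
  | t :: ts =>
    if pvIsPM t then
      let pr := pvTakeRun ts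
      (t :: pr.1, pr.2)
    else ([], t :: ts)

theorem pvTakeRun_snd_le : ∀ ts : List String, (pvTakeRun ts).2.length ≤ ts.length := by
  intro ts
  induction ts with
  | nil => simp [pvTakeRun]
  | cons t ts ih =>
    by_cases h : pvIsPM t = true
    · simp only [pvTakeRun, h]
      exact Nat.le_succ_of_le ih
    · simp [pvTakeRun, h]

/-- The outer `while` of Source B: `trigger` says whether a leading `+`/`-` is unary. -/
def pvGoB (trigger : Bool) : List String → List String
  | [] => []
  | t :: ts =>
    if pvIsPM t then
      let pr := pvTakeRun ts
      ((if trigger then "u" ++ t else t) :: pr.1.map (fun x => "u" ++ x)) ++ pvGoB false pr.2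
    else
      t :: pvGoB (t == "*" || t == "/" || t == "(") ts
termination_by ts => ts.length
decreasing_by
  · exact Nat.lt_succ_of_le (pvTakeRun_snd_le ts)
  · simp

def identifyUnary_alt (tokens : List String) : List String := pvGoB true tokens

-- ===== PRECONDITION & SPEC =====
def Spec_identifyUnary (tokens : List String) (out : List String) : Prop := out = identifyUnary_alt tokens
instance (tokens : List String) (out : List String) : Decidable (Spec_identifyUnary tokens out) := by unfold Spec_identifyUnary; infer_instance

-- ===== CLAIM (what is proved, stated in full; the proofs are below) =====
def Claim_equal_identifyUnary : Prop := ∀ (tokens : List String), Dom_identifyUnary tokens → Spec_identifyUnary tokens (identifyUnary tokens)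

-- ===== LEMMAS AND PROOFS =====

/-- The body of A's loop for index `i`, as a single value appended to `retval`. -/
def pvBodyA (tokens : List String) (i : Int) : String :=
  if i == 0 && (PySem.List.pyGetD tokens i "" == "+" || PySem.List.pyGetD tokens i "" == "-") then
    "u" ++ PySem.List.pyGetD tokens i ""
  else if decide (i > 0) &&
          (PySem.List.pyGetD tokens i "" == "+" || PySem.List.pyGetD tokens i "" == "-") &&
          (PySem.List.pyGetD tokens (i - 1) "" == "+" || PySem.List.pyGetD tokens (i - 1) "" == "-" ||
           PySem.List.pyGetD tokens (i - 1) "" == "*" || PySem.List.pyGetD tokens (i - 1) "" == "/" ||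
           PySem.List.pyGetD tokens (i - 1) "" == "(") then
    "u" ++ PySem.List.pyGetD tokens i ""
  else
    PySem.List.pyGetD tokens i ""

theorem identifyUnary_eq_map (tokens : List String) :
    identifyUnary tokens = (List.range tokens.length).map (fun k : Nat => pvBodyA tokens (k : Int)) := by
  unfold identifyUnary
  have hfun : (fun (retval : List String) (i : Int) =>
      if i == 0 && (PySem.List.pyGetD tokens i "" == "+" || PySem.List.pyGetD tokens i "" == "-") then
        retval ++ ["u" ++ PySem.List.pyGetD tokens i ""]
      else if decide (i > 0) &&
              (PySem.List.pyGetD tokens i "" == "+" || PySem.List.pyGetD tokens i "" == "-") &&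
              (PySem.List.pyGetD tokens (i - 1) "" == "+" || PySem.List.pyGetD tokens (i - 1) "" == "-" ||
               PySem.List.pyGetD tokens (i - 1) "" == "*" || PySem.List.pyGetD tokens (i - 1) "" == "/" ||
               PySem.List.pyGetD tokens (i - 1) "" == "(") then
        retval ++ ["u" ++ PySem.List.pyGetD tokens i ""]
      else
        retval ++ [PySem.List.pyGetD tokens i ""]) =
      (fun retval i => retval ++ [pvBodyA tokens i]) := by
    funext retval i
    unfold pvBodyA
    split_ifs <;> rfl
  rw [hfun, PySem.List.foldl_append_singleton_eq_map, PySem.List.pyRange_zero_natCast,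
      List.map_map]
  simp [Function.comp]

theorem pvBodyA_zero (tokens : List String) (h : 0 < tokens.length) :
    pvBodyA tokens 0 =
      if (tokens[0] == "+" || tokens[0] == "-") then "u" ++ tokens[0] else tokens[0] := by
  have hg : PySem.List.pyGetD tokens (0 : Int) "" = tokens[0] := by
    have := PySem.List.pyGetD_natCast tokens 0 ""
    simpa [List.getD_eq_getElem?_getD, List.getElem?_eq_getElem h] using this
  simp [pvBodyA, hg]

theorem pvBodyA_succ (tokens : List String) (j : Nat) (h : j + 1 < tokens.length) :
    pvBodyA tokens ((j + 1 : Nat) : Int) =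
      if (tokens[j + 1] == "+" || tokens[j + 1] == "-") &&
         (tokens[j] == "+" || tokens[j] == "-" || tokens[j] == "*" || tokens[j] == "/" ||
          tokens[j] == "(") then "u" ++ tokens[j + 1] else tokens[j + 1] := by
  have hj : j < tokens.length := by omega
  have hg1 : PySem.List.pyGetD tokens ((j + 1 : Nat) : Int) "" = tokens[j + 1] := by
    have := PySem.List.pyGetD_natCast tokens (j + 1) ""
    simp [List.getD_eq_getElem?_getD, List.getElem?_eq_getElem h] at this
    exact this
  have hcast : ((j + 1 : Nat) : Int) - 1 = ((j : Nat) : Int) := by push_cast; ring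
  have hg2 : PySem.List.pyGetD tokens (((j + 1 : Nat) : Int) - 1) "" = tokens[j] := by
    rw [hcast]
    have := PySem.List.pyGetD_natCast tokens j ""
    simpa [List.getD_eq_getElem?_getD, List.getElem?_eq_getElem hj] using this
  simp only [pvBodyA, hg1, hg2]
  simp
  intro habs
  exact absurd habs (by omega)

/-- Whether a raw token triggers unary marking of a following `+`/`-`. -/
def pvIsTrig (t : String) : Bool := pvIsPM t || t == "*" || t == "/" || t == "("

/-- Proof-only reformulation of B as the obvious one-token-at-a-time recursion. -/
def pvSimple (trigger : Bool) : List String → List String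
  | [] => []
  | t :: ts => (if pvIsPM t && trigger then "u" ++ t else t) :: pvSimple (pvIsTrig t) ts

theorem pvGoB_nil (trigger : Bool) : pvGoB trigger [] = [] := by
  rw [pvGoB.eq_def]

theorem pvGoB_cons (trigger : Bool) (t : String) (ts : List String) :
    pvGoB trigger (t :: ts) =
      if pvIsPM t then
        ((if trigger then "u" ++ t else t) :: (pvTakeRun ts).1.map (fun x => "u" ++ x))
          ++ pvGoB false (pvTakeRun ts).2
      else t :: pvGoB (t == "*" || t == "/" || t == "(") ts := by
  rw [pvGoB.eq_def]

theorem pvGoB_run_aux : ∀ ts : List String,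
    (pvTakeRun ts).1.map (fun x => "u" ++ x) ++ pvGoB false (pvTakeRun ts).2 = pvGoB true ts := by
  intro ts
  cases ts with
  | nil => simp [pvTakeRun, pvGoB_nil]
  | cons s ss =>
    by_cases h : pvIsPM s = true
    · simp [pvTakeRun, pvGoB_cons, h]
    · simp [pvTakeRun, pvGoB_cons, h]

theorem pvGoB_eq_simple : ∀ (ts : List String) (trigger : Bool), pvGoB trigger ts = pvSimple trigger ts := by
  intro ts
  induction ts with
  | nil => intro trigger; simp [pvGoB_nil, pvSimple]
  | cons t ts ih =>
    intro trigger
    by_cases h : pvIsPM t = true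
    · rw [pvGoB_cons, if_pos h]
      have : ((if trigger then "u" ++ t else t) :: (pvTakeRun ts).1.map (fun x => "u" ++ x))
            ++ pvGoB false (pvTakeRun ts).2
          = (if trigger then "u" ++ t else t) :: pvGoB true ts := by
        rw [List.cons_append, pvGoB_run_aux ts]
      rw [this, ih true]
      simp [pvSimple, pvIsTrig, h]
    · rw [pvGoB_cons, if_neg h, ih]
      simp [pvSimple, pvIsTrig, h]

theorem pvSimple_length : ∀ (ts : List String) (trigger : Bool), (pvSimple trigger ts).length = ts.length := by
  intro ts
  induction ts with
  | nil => intro _; simp [pvSimple]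
  | cons t ts ih => intro trigger; simp [pvSimple, ih]

theorem pvSimple_getElem : ∀ (ts : List String) (trigger : Bool) (k : Nat) (h : k < ts.length),
    (pvSimple trigger ts)[k]'(by rw [pvSimple_length]; exact h) =
      (if k = 0 then (if pvIsPM ts[0] && trigger then "u" ++ ts[0]'(by omega) else ts[0]'(by omega))
       else (if pvIsPM (ts[k]'h) && pvIsTrig (ts[k-1]'(by omega)) then "u" ++ ts[k]'h else ts[k]'h)) := by
  intro ts
  induction ts with
  | nil => intro _ k h; simp at h
  | cons t ts ih =>
    intro trigger k h
    cases k with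
    | zero => simp [pvSimple]
    | succ j =>
      have hj : j < ts.length := by simpa using h
      have := ih (pvIsTrig t) j hj
      simp only [pvSimple, List.getElem_cons_succ]
      rw [this]
      cases j with
      | zero => simp
      | succ m => simp

-- ===== VERDICT (by name: the statement is the Claim_ definition above) =====
theorem identifyUnary_spec : Claim_equal_identifyUnary := by
  intro tokens _
  unfold Spec_identifyUnary identifyUnary_alt
  rw [identifyUnary_eq_map, pvGoB_eq_simple]
  apply List.ext_getElem
  · simp [pvSimple_length]
  · intro k hk hk'
    have hklen : k < tokens.length := by simpa using hk
    rw [pvSimple_getElem tokens true k hklen]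
    simp only [List.getElem_map, List.getElem_range]
    cases k with
    | zero =>
      rw [show ((0 : Nat) : Int) = 0 by simp, pvBodyA_zero tokens hklen]
      simp [pvIsPM]
    | succ j =>
      rw [pvBodyA_succ tokens j hklen]
      simp [pvIsPM, pvIsTrig]
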